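-- pv_equiv track=rewrite | github.com/dhruv-mangroliya/BTP_Phase_2 | Hetero_AIML.py | process_protein_sequence
-- ===== SOURCE A (Python) =====
-- from collections import defaultdict
--
-- def fragment_protein_sequence(sequence, max_length=1000):
--     return [sequence[i:i+max_length] for i in range(0, len(sequence), max_length)]
--
-- def find_hetero_amino_acid_repeats(sequence):
--     repeat_counts = defaultdict(int)
--
--     # Iterate over all possible substring lengths
--     for length in range(2, len(sequence) + 1):
--         for i in range(len(sequence) - length + 1):
--             substring = sequence[i:i+length]
--             repeat_counts[substring] += 1
--
--     # Filter out substrings that occur only once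
--     return {k: v for k, v in repeat_counts.items() if v > 1}
--
-- def check_boundary_repeats(fragments, final_repeats, overlap=50):
--     """
--     Check for repeating substrings that span across fragment boundaries
--     and update the final repeats dictionary accordingly.
--
--     Ensures that repeats are truly spanning both fragments.
--     """
--     for i in range(len(fragments) - 1):
--         left_overlap = fragments[i][-overlap:] if len(fragments[i]) >= overlap else fragments[i]
--         right_overlap = fragments[i + 1][:overlap] if len(fragments[i + 1]) >= overlap else fragments[i + 1]
--         overlap_region = left_overlap + right_overlap  # Join both
--
--         boundary_repeats = find_hetero_amino_acid_repeats(overlap_region)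
--
--         for substring, count in boundary_repeats.items():
--             # Ensure substring spans across both fragments
--             if any(aa in left_overlap for aa in substring) and any(aa in right_overlap for aa in substring):
--                 final_repeats[substring] += count  # Only add if spanning both fragments
--
--     return final_repeats
--
-- def find_new_boundary_repeats(fragments, final_repeats, overlap=50):
--     """
--     Identify new repeats that appear only at fragmentation boundaries
--     and update the final dictionary accordingly.
--
--     Ensures that:
--     - The detected repeat spans across two fragments.
--     - It is *not* already counted from individual fragments.
--     """
--     new_repeats = defaultdict(int)
--
--     for i in range(len(fragments) - 1):
--         left_overlap = fragments[i][-overlap:] if len(fragments[i]) >= overlap else fragments[i]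
--         right_overlap = fragments[i + 1][:overlap] if len(fragments[i + 1]) >= overlap else fragments[i + 1]
--         overlap_region = left_overlap + right_overlap  # Join both
--
--         boundary_repeats = find_hetero_amino_acid_repeats(overlap_region)
--
--         for substring, count in boundary_repeats.items():
--             # Ensure substring spans across both fragments
--             if any(aa in left_overlap for aa in substring) and any(aa in right_overlap for aa in substring):
--                 # Only add if it's a *new* repeat (not already in final dictionary)
--                 if substring not in final_repeats:
--                     new_repeats[substring] += count
--
--     return new_repeats
--
-- def process_protein_sequence(sequence, overlap=50):
--     fragments = fragment_protein_sequence(sequence)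
--
--     # Step 1: Find repeats in each fragment
--     final_repeats = defaultdict(int)
--     for fragment in fragments:
--         fragment_repeats = find_hetero_amino_acid_repeats(fragment)
--         for k, v in fragment_repeats.items():
--             final_repeats[k] += v
--
--     # Step 2: Check and update repeats at boundaries
--     final_repeats = check_boundary_repeats(fragments, final_repeats, overlap)
--
--     # Step 3: Find new repeats emerging at boundaries
--     new_repeats = find_new_boundary_repeats(fragments, final_repeats, overlap)
--
--     # Step 4: Merge new repeats into final dictionary
--     for k, v in new_repeats.items():
--         final_repeats[k] += v
--
--     return final_repeats
-- ===== SOURCE B (Python) =====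
-- from collections import defaultdict
--
-- def repeated_substrings(region):
--     # Distinct repeated substrings of region with their overlapping occurrence
--     # counts: per length, deduplicate the windows and count each candidate by a
--     # direct scan of the window list (no running counter dict, no filter pass).
--     # Stop as soon as a length yields no repeat: a repeated substring of length
--     # L+1 would make its length-L prefix repeated too.
--     out = {}
--     n = len(region)
--     for length in range(2, n + 1):
--         windows = [region[i:i+length] for i in range(n - length + 1)]
--         added = False
--         for sub in dict.fromkeys(windows):
--             c = windows.count(sub)
--             if c > 1:
--                 out[sub] = c
--                 added = True
--         if not added:
--             break
--     return out
--
-- def process_protein_sequence(sequence, overlap=50):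
--     fragments = [sequence[i:i+1000] for i in range(0, len(sequence), 1000)]
--     final = defaultdict(int)
--     for fragment in fragments:
--         for sub, c in repeated_substrings(fragment).items():
--             final[sub] += c
--     for left, right in zip(fragments, fragments[1:]):
--         if len(left) >= overlap:
--             left = left[-overlap:]
--         if len(right) >= overlap:
--             right = right[:overlap]
--         for sub, c in repeated_substrings(left + right).items():
--             if any(ch in left for ch in sub) and any(ch in right for ch in sub):
--                 final[sub] += c
--     return final
-- ===== Notes on version B (the rewrite author's own statement) =====
-- stated objective: alternative
-- what changed: B replaces A's running counter-dict over every window plus a filter pass by a per-length candidate scan (deduplicate each length's windows, count each distinct candidate by a direct scan of the window list) with an early break once a length yields no repeat (a longer repeat would make its prefix repeat), and drops A's find_new_boundary_repeats/merge stages entirely, which are a proven no-op (after check_boundary_repeats every spanning repeat is already a key, so the 'not in final_repeats' guard never fires).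
import Mathlib
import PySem

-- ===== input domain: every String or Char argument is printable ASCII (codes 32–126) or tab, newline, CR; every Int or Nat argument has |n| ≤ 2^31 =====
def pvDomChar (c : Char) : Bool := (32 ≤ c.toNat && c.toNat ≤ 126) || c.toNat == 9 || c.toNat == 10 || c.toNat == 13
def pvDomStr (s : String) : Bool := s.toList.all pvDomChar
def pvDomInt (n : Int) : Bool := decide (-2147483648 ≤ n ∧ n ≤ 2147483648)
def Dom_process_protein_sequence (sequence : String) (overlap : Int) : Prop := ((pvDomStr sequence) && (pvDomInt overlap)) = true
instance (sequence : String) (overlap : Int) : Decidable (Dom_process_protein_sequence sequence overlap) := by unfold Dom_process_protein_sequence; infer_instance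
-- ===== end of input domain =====

-- B counts each region's repeated substrings by per-length window dedup + direct occurrence
-- scans (no running counter dict), breaking once a length has no repeat, and drops A's
-- find_new_boundary_repeats/merge stage, a proven no-op; objective: alternative (the early
-- break helps on typical inputs, not on highly repetitive ones). Return-value equivalence only.

-- ===== PORT A =====
-- fragment_protein_sequence(sequence, 1000)
def pvFragments (s : List Char) : List (List Char) :=
  (PySem.List.pyRange 0 s.length 1000).map
    (fun i => PySem.List.slice s (some i) (some (i + 1000)))

-- find_hetero_amino_acid_repeats; the final dict comprehension is ported as its items list
-- (keys are already distinct; callers only iterate .items())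
def pvHetero (s : List Char) : List (List Char × Int) :=
  let n := s.length
  let counts : PySem.Dict (List Char) Int :=
    (PySem.List.pyRange 2 ((n : Int) + 1) 1).foldl
      (fun d len =>
        (PySem.List.pyRange 0 ((n : Int) - len + 1) 1).foldl
          (fun d i => d.modify (PySem.List.slice s (some i) (some (i + len))) 0 (· + 1)) d)
      PySem.Dict.empty
  counts.items.filter (fun kv => 1 < kv.2)

-- any(aa in x for aa in substring)
def pvAnyIn (sub x : List Char) : Bool := sub.any (fun aa => PySem.Chars.isIn [aa] x)

def pvLeftOv (frag : List Char) (overlap : Int) : List Char :=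
  if overlap ≤ (frag.length : Int) then PySem.List.slice frag (some (-overlap)) none else frag

def pvRightOv (frag : List Char) (overlap : Int) : List Char :=
  if overlap ≤ (frag.length : Int) then PySem.List.slice frag none (some overlap) else frag

-- check_boundary_repeats
def pvCheck (fragments : List (List Char)) (final : PySem.Dict (List Char) Int)
    (overlap : Int) : PySem.Dict (List Char) Int :=
  (PySem.List.pyRange 0 ((fragments.length : Int) - 1) 1).foldl
    (fun d i =>
      let left := pvLeftOv (PySem.List.pyGetD fragments i []) overlap
      let right := pvRightOv (PySem.List.pyGetD fragments (i + 1) []) overlap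
      (pvHetero (left ++ right)).foldl
        (fun d kv =>
          if pvAnyIn kv.1 left && pvAnyIn kv.1 right then d.modify kv.1 0 (· + kv.2) else d)
        d)
    final

-- find_new_boundary_repeats
def pvFindNew (fragments : List (List Char)) (final : PySem.Dict (List Char) Int)
    (overlap : Int) : PySem.Dict (List Char) Int :=
  (PySem.List.pyRange 0 ((fragments.length : Int) - 1) 1).foldl
    (fun nd i =>
      let left := pvLeftOv (PySem.List.pyGetD fragments i []) overlap
      let right := pvRightOv (PySem.List.pyGetD fragments (i + 1) []) overlap
      (pvHetero (left ++ right)).foldl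
        (fun nd kv =>
          if pvAnyIn kv.1 left && pvAnyIn kv.1 right then
            if final.contains kv.1 then nd else nd.modify kv.1 0 (· + kv.2)
          else nd)
        nd)
    PySem.Dict.empty

def process_protein_sequence (sequence : String) (overlap : Int) : List (String × Int) :=
  let fragments := pvFragments sequence.toList
  -- Step 1
  let final0 : PySem.Dict (List Char) Int :=
    fragments.foldl
      (fun d frag => (pvHetero frag).foldl (fun d kv => d.modify kv.1 0 (· + kv.2)) d)
      PySem.Dict.empty
  -- Step 2
  let final1 := pvCheck fragments final0 overlap
  -- Step 3
  let newRepeats := pvFindNew fragments final1 overlap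
  -- Step 4
  let final2 := newRepeats.items.foldl (fun d kv => d.modify kv.1 0 (· + kv.2)) final1
  final2.items.map (fun kv => (String.ofList kv.1, kv.2))

-- ===== PORT B =====
-- windows = [region[i:i+length] for i in range(n - length + 1)]
def pvWindowsL (s : List Char) (len : Int) : List (List Char) :=
  (PySem.List.pyRange 0 ((s.length : Int) - len + 1) 1).map
    (fun i => PySem.List.slice s (some i) (some (i + len)))

-- repeated_substrings(region): per length, dedup the windows, count each candidate
-- directly; break as soon as a length yields no repeat (the 'if not added: break')
def pvRepLoop (s : List Char) : List Int → PySem.Dict (List Char) Int → PySem.Dict (List Char) Int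
  | [], out => out
  | len :: rest, out =>
      let windows := pvWindowsL s len
      let r := (PySem.List.dedup windows).foldl
          (fun (q : PySem.Dict (List Char) Int × Bool) sub =>
            let c : Int := (PySem.List.count windows sub : Int)
            if 1 < c then (q.1.insert sub c, true) else q)
          (out, false)
      if r.2 then pvRepLoop s rest r.1 else r.1

def pvRepB (s : List Char) : PySem.Dict (List Char) Int :=
  pvRepLoop s (PySem.List.pyRange 2 ((s.length : Int) + 1) 1) PySem.Dict.empty

def process_protein_sequence_alt (sequence : String) (overlap : Int) : List (String × Int) :=
  let fragments :=
    (PySem.List.pyRange 0 sequence.toList.length 1000).map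
      (fun i => PySem.List.slice sequence.toList (some i) (some (i + 1000)))
  let final0 : PySem.Dict (List Char) Int :=
    fragments.foldl
      (fun d frag => (pvRepB frag).items.foldl (fun d kv => d.modify kv.1 0 (· + kv.2)) d)
      PySem.Dict.empty
  let final1 :=
    (fragments.zip (PySem.List.slice fragments (some 1) none)).foldl
      (fun d p =>
        let left := if overlap ≤ (p.1.length : Int)
                    then PySem.List.slice p.1 (some (-overlap)) none else p.1
        let right := if overlap ≤ (p.2.length : Int)
                     then PySem.List.slice p.2 none (some overlap) else p.2
        (pvRepB (left ++ right)).items.foldl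
          (fun d kv =>
            if kv.1.any (fun ch => PySem.Chars.isIn [ch] left) &&
               kv.1.any (fun ch => PySem.Chars.isIn [ch] right) then
              d.modify kv.1 0 (· + kv.2)
            else d)
          d)
      final0
  final1.items.map (fun kv => (String.ofList kv.1, kv.2))

-- ===== PRECONDITION & SPEC =====
def Spec_process_protein_sequence (sequence : String) (overlap : Int) (out : List (String × Int)) : Prop := out = process_protein_sequence_alt sequence overlap
instance (sequence : String) (overlap : Int) (out : List (String × Int)) : Decidable (Spec_process_protein_sequence sequence overlap out) := by unfold Spec_process_protein_sequence; infer_instance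

-- ===== CLAIM (what is proved, stated in full; the proofs are below) =====
def Claim_equal_process_protein_sequence : Prop := ∀ (sequence : String) (overlap : Int), Dom_process_protein_sequence sequence overlap → Spec_process_protein_sequence sequence overlap (process_protein_sequence sequence overlap)

-- ===== LEMMAS AND PROOFS =====

-- abbreviations used only by the proofs
def pvAdd (d : PySem.Dict (List Char) Int) (kv : List Char × Int) : PySem.Dict (List Char) Int :=
  d.modify kv.1 0 (· + kv.2)

def pvSpan (pr : List Char × List Char) (k : List Char) : Bool :=
  pvAnyIn k pr.1 && pvAnyIn k pr.2

def pvChkStep (d : PySem.Dict (List Char) Int) (pr : List Char × List Char) :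
    PySem.Dict (List Char) Int :=
  (pvHetero (pr.1 ++ pr.2)).foldl (fun d kv => if pvSpan pr kv.1 then pvAdd d kv else d) d

def pvNewStep (final : PySem.Dict (List Char) Int) (nd : PySem.Dict (List Char) Int)
    (pr : List Char × List Char) : PySem.Dict (List Char) Int :=
  (pvHetero (pr.1 ++ pr.2)).foldl
    (fun nd kv => if pvSpan pr kv.1 then (if final.contains kv.1 then nd else pvAdd nd kv) else nd) nd

def pvPairs (frags : List (List Char)) (ov : Int) : List (List Char × List Char) :=
  (frags.zip frags.tail).map (fun p => (pvLeftOv p.1 ov, pvRightOv p.2 ov))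

-- adjacent-pairs fold: an index loop over range(len(l)-1) is the fold over zip(l, l.tail)
theorem pv_zip_fold {α β : Type} (dflt : α) (g : β → α → α → β) :
    ∀ (l : List α) (d : β),
      (List.range (l.length - 1)).foldl (fun d k => g d (l.getD k dflt) (l.getD (k + 1) dflt)) d
        = (l.zip l.tail).foldl (fun d p => g d p.1 p.2) d := by
  intro l
  induction l with
  | nil => intro d; rfl
  | cons a t ih =>
    intro d
    cases t with
    | nil => rfl
    | cons b t' =>
      simp only [List.length_cons, Nat.add_sub_cancel, List.range_succ_eq_map,
        List.foldl_cons, List.foldl_map]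
      have := ih (g d a b)
      simp only [List.length_cons, Nat.add_sub_cancel] at this
      simpa [List.zip, Nat.succ_eq_add_one] using this

-- A's check_boundary_repeats is the fold of pvChkStep over the adjacent overlap pairs
theorem pvCheck_eq (frags : List (List Char)) (d : PySem.Dict (List Char) Int) (ov : Int) :
    pvCheck frags d ov = (pvPairs frags ov).foldl pvChkStep d := by
  unfold pvCheck pvPairs
  rw [PySem.List.pyRange_one, List.foldl_map]
  have hn : ((frags.length : Int) - 1 - 0).toNat = frags.length - 1 := by omega
  rw [hn]
  have h1 : ∀ k : Nat, ((0 : Int) + (k : Int)) = ((k : Int)) := by intro k; ring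
  simp only [h1, PySem.List.pyGetD_natCast]
  have h2 : ∀ k : Nat, ((k : Int) + 1) = (((k + 1 : Nat) : Int)) := by intro k; push_cast; ring
  simp only [h2, PySem.List.pyGetD_natCast]
  refine (pv_zip_fold ([] : List Char)
    (fun d L R => (pvHetero (pvLeftOv L ov ++ pvRightOv R ov)).foldl
      (fun d kv => if pvAnyIn kv.1 (pvLeftOv L ov) && pvAnyIn kv.1 (pvRightOv R ov)
                   then d.modify kv.1 0 (· + kv.2) else d) d) frags d).trans ?_
  rw [List.foldl_map]
  rfl

-- A's find_new_boundary_repeats is the fold of pvNewStep over the same pairs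
theorem pvFindNew_eq (frags : List (List Char)) (final : PySem.Dict (List Char) Int) (ov : Int) :
    pvFindNew frags final ov = (pvPairs frags ov).foldl (pvNewStep final) PySem.Dict.empty := by
  unfold pvFindNew pvPairs
  rw [PySem.List.pyRange_one, List.foldl_map]
  have hn : ((frags.length : Int) - 1 - 0).toNat = frags.length - 1 := by omega
  rw [hn]
  have h1 : ∀ k : Nat, ((0 : Int) + (k : Int)) = ((k : Int)) := by intro k; ring
  simp only [h1, PySem.List.pyGetD_natCast]
  have h2 : ∀ k : Nat, ((k : Int) + 1) = (((k + 1 : Nat) : Int)) := by intro k; push_cast; ring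
  simp only [h2, PySem.List.pyGetD_natCast]
  refine (pv_zip_fold ([] : List Char)
    (fun nd L R => (pvHetero (pvLeftOv L ov ++ pvRightOv R ov)).foldl
      (fun nd kv => if pvAnyIn kv.1 (pvLeftOv L ov) && pvAnyIn kv.1 (pvRightOv R ov)
                    then (if final.contains kv.1 then nd else nd.modify kv.1 0 (· + kv.2)) else nd) nd)
    frags PySem.Dict.empty).trans ?_
  rw [List.foldl_map]
  rfl

theorem pv_contains_add (d : PySem.Dict (List Char) Int) (kv : List Char × Int) (x : List Char)
    (h : d.contains x = true) : (pvAdd d kv).contains x = true := by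
  unfold pvAdd
  rw [PySem.Dict.contains_modify]
  simp [h]

theorem pv_contains_chkFold (l : List (List Char × Int)) (p : List Char × Int → Bool) :
    ∀ (d : PySem.Dict (List Char) Int) (x : List Char), d.contains x = true →
      (l.foldl (fun d kv => if p kv then pvAdd d kv else d) d).contains x = true := by
  induction l with
  | nil => intro d x h; simpa using h
  | cons kv t ih =>
    intro d x h
    simp only [List.foldl_cons]
    by_cases hp : p kv
    · simp only [hp, if_true]; exact ih _ _ (pv_contains_add d kv x h)
    · simp only [hp]; exact ih _ _ (by simpa [hp] using h)

theorem pv_contains_chkStep (d : PySem.Dict (List Char) Int) (pr : List Char × List Char)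
    (x : List Char) (h : d.contains x = true) : (pvChkStep d pr).contains x = true := by
  unfold pvChkStep
  exact pv_contains_chkFold _ _ d x h

theorem pv_contains_chkSteps (l : List (List Char × List Char)) :
    ∀ (d : PySem.Dict (List Char) Int) (x : List Char), d.contains x = true →
      (l.foldl pvChkStep d).contains x = true := by
  induction l with
  | nil => intro d x h; simpa using h
  | cons pr t ih => intro d x h; exact ih _ _ (pv_contains_chkStep d pr x h)

-- every spanning repeat of a processed pair is a key of the dict after the check pass
theorem pv_hit (prs : List (List Char × List Char)) (pr : List Char × List Char)
    (hpr : pr ∈ prs) (kv : List Char × Int) (hkv : kv ∈ pvHetero (pr.1 ++ pr.2))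
    (hspan : pvSpan pr kv.1 = true) (d0 : PySem.Dict (List Char) Int) :
    (prs.foldl pvChkStep d0).contains kv.1 = true := by
  obtain ⟨s, t, rfl⟩ := List.append_of_mem hpr
  rw [List.foldl_append, List.foldl_cons]
  apply pv_contains_chkSteps
  unfold pvChkStep
  obtain ⟨u, w, hl⟩ := List.append_of_mem hkv
  rw [hl, List.foldl_append, List.foldl_cons, hspan, if_pos rfl]
  apply pv_contains_chkFold
  unfold pvAdd
  rw [PySem.Dict.contains_modify]
  simp

theorem pv_foldl_id {α β : Type} (l : List α) (f : β → α → β)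
    (h : ∀ (d : β) (x : α), x ∈ l → f d x = d) : ∀ d, l.foldl f d = d := by
  induction l with
  | nil => intro d; rfl
  | cons a t ih =>
    intro d
    rw [List.foldl_cons, h d a (by simp)]
    exact ih (fun d x hx => h d x (by simp [hx])) d

-- the find_new pass after the check pass produces the empty dict
theorem pv_noop (prs : List (List Char × List Char)) (d0 : PySem.Dict (List Char) Int) :
    prs.foldl (pvNewStep (prs.foldl pvChkStep d0)) PySem.Dict.empty = PySem.Dict.empty := by
  apply pv_foldl_id
  intro nd pr hpr
  unfold pvNewStep
  apply pv_foldl_id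
  intro nd' kv hkv
  by_cases hspan : pvSpan pr kv.1
  · rw [hspan, if_pos rfl, pv_hit prs pr hpr kv hkv hspan d0, if_pos rfl]
  · simp [hspan]

-- ===== per-region equality: pvRepB's items ARE pvHetero =====

-- all length-≥2 window lists of s, concatenated (the list A's counter dict counts)
def pvWindows (s : List Char) : List (List Char) :=
  (PySem.List.pyRange 2 ((s.length : Int) + 1) 1).flatMap (pvWindowsL s)

-- A's substring-counting dict (the fold inside pvHetero)
def pvCountsA (s : List Char) : PySem.Dict (List Char) Int :=
  (PySem.List.pyRange 2 ((s.length : Int) + 1) 1).foldl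
    (fun d len =>
      (PySem.List.pyRange 0 ((s.length : Int) - len + 1) 1).foldl
        (fun d i => d.modify (PySem.List.slice s (some i) (some (i + len))) 0 (· + 1)) d)
    PySem.Dict.empty

theorem pv_hetero_eq (s : List Char) :
    pvHetero s = (pvCountsA s).items.filter (fun kv => 1 < kv.2) := rfl

-- A's counts dict is the Counter of the concatenated window lists
theorem pv_countsA_eq_counter (s : List Char) :
    pvCountsA s = PySem.Dict.counter (pvWindows s) := by
  unfold pvCountsA pvWindows
  rw [PySem.Dict.counter_eq_foldl, List.foldl_flatMap]
  congr 1
  funext d len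
  unfold pvWindowsL
  rw [List.foldl_map]

-- every window of level len has length len
theorem pv_len_window (s : List Char) (len : Int) (hl : 0 ≤ len) :
    ∀ x ∈ pvWindowsL s len, (x.length : Int) = len := by
  intro x hx
  unfold pvWindowsL at hx
  obtain ⟨i, hi, rfl⟩ := List.mem_map.mp hx
  rw [PySem.List.mem_pyRange_one] at hi
  obtain ⟨hi1, hi2⟩ := hi
  have hb : (0 : Int) ≤ i + len := by omega
  rw [PySem.List.slice_toNat s hi1 hb]
  simp only [List.length_take, List.length_drop]
  omega

theorem pv_window_ne (s : List Char) (l l' : Int) (h0 : 0 ≤ l) (h0' : 0 ≤ l') (hne : l ≠ l')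
    (x : List Char) (hx : x ∈ pvWindowsL s l) : x ∉ pvWindowsL s l' := by
  intro hx'
  have := pv_len_window s l h0 x hx
  have := pv_len_window s l' h0' x hx'
  omega

-- Set.update of disjoint elements appends
theorem pv_update_append {α : Type} [BEq α] [LawfulBEq α] :
    ∀ (ys s t : List α), (∀ y ∈ ys, y ∉ s) →
      PySem.Set.update (s ++ t) ys = s ++ PySem.Set.update t ys := by
  intro ys
  induction ys with
  | nil => intro s t _; rfl
  | cons y ys ih =>
    intro s t h
    have hys : y ∉ s := h y (by simp)
    have hadd : PySem.Set.add (s ++ t) y = s ++ PySem.Set.add t y := by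
      unfold PySem.Set.add
      by_cases hyt : y ∈ t <;> simp [hyt, hys, List.append_assoc]
    show PySem.Set.update (PySem.Set.add (s ++ t) y) ys = _
    rw [hadd, ih s _ (fun z hz => h z (by simp [hz]))]
    rfl

theorem pv_ofList_append {α : Type} [BEq α] [LawfulBEq α] (xs ys : List α)
    (h : ∀ y ∈ ys, y ∉ xs) :
    PySem.Set.ofList (xs ++ ys) = PySem.Set.ofList xs ++ PySem.Set.ofList ys := by
  rw [PySem.Set.ofList_append]
  have hx : ∀ y ∈ ys, y ∉ PySem.Set.ofList xs := by
    intro y hy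
    rw [PySem.Set.mem_ofList]
    exact h y hy
  have := pv_update_append ys (PySem.Set.ofList xs) [] hx
  simpa using this

-- dedup distributes over the disjoint levels
theorem pv_set_flat (s : List Char) :
    ∀ (L : List Int), (∀ l ∈ L, 0 ≤ l) → L.Nodup →
      PySem.Set.ofList (L.flatMap (pvWindowsL s))
        = L.flatMap (fun l => PySem.Set.ofList (pvWindowsL s l)) := by
  intro L
  induction L with
  | nil => intro _ _; rfl
  | cons a t ih =>
    intro h0 hnd
    rw [List.flatMap_cons, List.flatMap_cons]
    rw [pv_ofList_append]
    · rw [ih (fun l hl => h0 l (by simp [hl])) (List.nodup_cons.mp hnd).2]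
    · intro y hy
      obtain ⟨l', hl', hy'⟩ := List.mem_flatMap.mp hy
      exact fun hmem => pv_window_ne s l' a (h0 l' (by simp [hl'])) (h0 a (by simp))
        (fun he => (List.nodup_cons.mp hnd).1 (he ▸ hl')) y hy' hmem

-- the count of a level-len window in the full window list is its count at its own level
theorem pv_count_flat (s : List Char) :
    ∀ (L : List Int), (∀ l ∈ L, 0 ≤ l) → L.Nodup →
      ∀ len ∈ L, ∀ x ∈ pvWindowsL s len,
        List.count x (L.flatMap (pvWindowsL s)) = List.count x (pvWindowsL s len) := by
  intro L
  induction L with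
  | nil => intro _ _ len h; simp at h
  | cons a t ih =>
    intro h0 hnd len hlen x hx
    rw [List.flatMap_cons, List.count_append]
    rcases List.mem_cons.mp hlen with rfl | hlen'
    · have : List.count x (t.flatMap (pvWindowsL s)) = 0 := by
        rw [List.count_eq_zero]
        intro hmem
        obtain ⟨l', hl', hy'⟩ := List.mem_flatMap.mp hmem
        exact pv_window_ne s len l' (h0 len (by simp)) (h0 l' (by simp [hl']))
          (fun he => (List.nodup_cons.mp hnd).1 (he ▸ hl')) x hx hy'
      omega
    · have : List.count x (pvWindowsL s a) = 0 := by
        rw [List.count_eq_zero]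
        exact pv_window_ne s len a (h0 len (by simp [hlen'])) (h0 a (by simp))
          (fun he => (List.nodup_cons.mp hnd).1 (he ▸ hlen')) x hx
      rw [this, ih (fun l hl => h0 l (by simp [hl])) (List.nodup_cons.mp hnd).2 len hlen' x hx]
      omega

-- one level's contribution, as both sides produce it
def pvBlock (s : List Char) (len : Int) : List (List Char × Int) :=
  ((PySem.Set.ofList (pvWindowsL s len)).filter
      (fun k => 1 < (List.count k (pvWindowsL s len) : Int))).map
    (fun k => (k, (List.count k (pvWindowsL s len) : Int)))

-- A's pvHetero decomposed into per-level blocks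
theorem pv_hetero_blocks (s : List Char) :
    pvHetero s = (PySem.List.pyRange 2 ((s.length : Int) + 1) 1).flatMap (pvBlock s) := by
  have h0 : ∀ l ∈ PySem.List.pyRange 2 ((s.length : Int) + 1) 1, (0 : Int) ≤ l := by
    intro l hl
    rw [PySem.List.mem_pyRange_one] at hl
    omega
  have hnd := PySem.List.nodup_pyRange_one 2 ((s.length : Int) + 1)
  rw [pv_hetero_eq, pv_countsA_eq_counter, PySem.Dict.items_counter, List.filter_map]
  simp only [Function.comp_def, pvWindows]
  rw [pv_set_flat s _ h0 hnd, List.filter_flatMap, List.map_flatMap]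
  apply List.flatMap_congr
  intro len hlen
  have hcnt : ∀ k ∈ PySem.Set.ofList (pvWindowsL s len),
      List.count k ((PySem.List.pyRange 2 ((s.length : Int) + 1) 1).flatMap (pvWindowsL s))
        = List.count k (pvWindowsL s len) := by
    intro k hk
    exact pv_count_flat s _ h0 hnd len hlen k ((PySem.Set.mem_ofList _ _).mp hk)
  unfold pvBlock
  rw [List.filter_congr (fun k hk => by rw [hcnt k hk])]
  apply List.map_congr_left
  intro k hk
  rw [hcnt k ((PySem.Set.mem_ofList _ _).mpr ((PySem.Set.mem_ofList _ _).mp (List.mem_of_mem_filter hk)))]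

-- a conditional-insert fold is the insert fold over the filtered list
theorem pv_foldl_if_insert {κ ν : Type} [BEq κ] (p : κ → Prop) [DecidablePred p] (v : κ → ν) :
    ∀ (l : List κ) (d : PySem.Dict κ ν),
      l.foldl (fun d x => if p x then d.insert x (v x) else d) d
        = (l.filter (fun x => decide (p x))).foldl (fun d x => d.insert x (v x)) d := by
  intro l
  induction l with
  | nil => intro d; rfl
  | cons a t ih =>
    intro d
    by_cases hp : p a
    · simp [hp, ih]
    · simp [hp, ih]

-- B's per-length body (ignoring the 'added' flag), named
def pvLevelStep (s : List Char) (out : PySem.Dict (List Char) Int) (len : Int) :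
    PySem.Dict (List Char) Int :=
  (PySem.List.dedup (pvWindowsL s len)).foldl
    (fun out sub =>
      if 1 < ((List.count sub (pvWindowsL s len) : Nat) : Int) then
        out.insert sub ((List.count sub (pvWindowsL s len) : Nat) : Int)
      else out)
    out

-- the filtered candidate list of one length
def pvCand (s : List Char) (len : Int) : List (List Char) :=
  (PySem.Set.ofList (pvWindowsL s len)).filter
    (fun k => 1 < (List.count k (pvWindowsL s len) : Int))

-- a fold that also records whether it ever inserted
theorem pv_fold_flag {κ ν : Type} [BEq κ] (p : κ → Prop) [DecidablePred p] (v : κ → ν) :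
    ∀ (l : List κ) (d : PySem.Dict κ ν) (b : Bool),
      l.foldl (fun (q : PySem.Dict κ ν × Bool) x => if p x then (q.1.insert x (v x), true) else q) (d, b)
        = (l.foldl (fun d x => if p x then d.insert x (v x) else d) d,
           b || !(l.filter (fun x => decide (p x))).isEmpty) := by
  intro l
  induction l with
  | nil => intro d b; simp
  | cons a t ih =>
    intro d b
    by_cases hp : p a
    · simp [hp, ih]
    · simp [hp, ih]

theorem pv_levelStep_items (s : List Char) (a : Int) (d : PySem.Dict (List Char) Int)
    (hdk : ∀ k ∈ d.keys, k ∉ pvWindowsL s a) :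
    (pvLevelStep s d a).items = d.items ++ (pvCand s a).map
      (fun k => (k, ((List.count k (pvWindowsL s a) : Nat) : Int))) := by
  unfold pvLevelStep
  rw [pv_foldl_if_insert (fun sub => 1 < ((List.count sub (pvWindowsL s a) : Nat) : Int))
    (fun sub => ((List.count sub (pvWindowsL s a) : Nat) : Int))]
  rw [PySem.List.dedup_eq_ofList]
  have hfresh : ∀ x ∈ pvCand s a, d.contains x = false := by
    intro x hx
    have hmem : x ∈ pvWindowsL s a :=
      (PySem.Set.mem_ofList _ _).mp (List.mem_of_mem_filter hx)
    rw [Bool.eq_false_iff]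
    intro hc
    exact hdk x ((PySem.Dict.contains_iff_mem_keys d x).mp hc) hmem
  have hndf : ((pvCand s a).map (fun x => x)).Nodup := by
    rw [List.map_id']
    exact (PySem.Set.nodup_ofList _).filter _
  exact PySem.Dict.items_foldl_insert_fresh _ (fun x => x)
    (fun x => ((List.count x (pvWindowsL s a) : Nat) : Int)) d hfresh hndf

theorem pv_block_eq_cand (s : List Char) (a : Int) :
    pvBlock s a = (pvCand s a).map
      (fun k => (k, ((List.count k (pvWindowsL s a) : Nat) : Int))) := rfl

-- 'this length produced a repeat'
def pvRep (s : List Char) (l : Int) : Prop := ∃ x, 2 ≤ List.count x (pvWindowsL s l)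

theorem pv_cand_empty_iff (s : List Char) (l : Int) : pvCand s l = [] ↔ ¬ pvRep s l := by
  unfold pvCand pvRep
  rw [List.filter_eq_nil_iff]
  constructor
  · intro h ⟨x, hx⟩
    have hmem : x ∈ pvWindowsL s l := List.count_pos_iff.mp (by omega)
    have := h x ((PySem.Set.mem_ofList _ _).mpr hmem)
    simp only [decide_eq_true_eq] at this
    omega
  · intro h x hx
    simp only [decide_eq_true_eq]
    intro hcnt
    exact h ⟨x, by exact_mod_cast hcnt⟩

-- a repeat of length l+1 forces a repeat of length l (its prefix)
theorem pv_rep_step (s : List Char) (l : Int) (hl : 0 ≤ l) (h : pvRep s (l + 1)) : pvRep s l := by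
  obtain ⟨x, hx⟩ := h
  by_cases hm : (s.length : Int) - (l + 1) + 1 ≤ 0
  · exfalso
    have hnil : pvWindowsL s (l + 1) = [] := by
      unfold pvWindowsL
      rw [PySem.List.pyRange_one_eq_nil (by omega)]
      rfl
    rw [hnil] at hx
    simp at hx
  · refine ⟨x.take l.toNat, ?_⟩
    unfold pvWindowsL at hx ⊢
    rw [List.count_eq_countP, List.countP_map] at hx
    rw [List.count_eq_countP, List.countP_map]
    rw [PySem.List.pyRange_one_append 0 ((s.length : Int) - (l + 1) + 1) ((s.length : Int) - l + 1)
      (by omega) (by omega), List.countP_append]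
    have hmono : List.countP
        ((fun y => y == x) ∘ (fun i => PySem.List.slice s (some i) (some (i + (l + 1)))))
        (PySem.List.pyRange 0 ((s.length : Int) - (l + 1) + 1) 1)
        ≤ List.countP
        ((fun y => y == x.take l.toNat) ∘ (fun i => PySem.List.slice s (some i) (some (i + l))))
        (PySem.List.pyRange 0 ((s.length : Int) - (l + 1) + 1) 1) := by
      apply List.countP_mono_left
      intro i hi hp
      rw [PySem.List.mem_pyRange_one] at hi
      simp only [Function.comp_apply, beq_iff_eq] at hp ⊢
      subst hp
      rw [PySem.List.slice_toNat s hi.1 (by omega), PySem.List.slice_toNat s hi.1 (by omega),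
        List.take_take]
      congr 1
      omega
    omega

theorem pv_not_rep_of_le (s : List Char) (a l : Int) (ha : 0 ≤ a) (hle : a ≤ l)
    (h : ¬ pvRep s a) : ¬ pvRep s l := by
  have key : ∀ k : Nat, ¬ pvRep s (a + k) := by
    intro k
    induction k with
    | zero => simpa using h
    | succ k ih =>
      intro hP
      apply ih
      apply pv_rep_step s (a + k) (by positivity)
      have : a + ((k + 1 : Nat) : Int) = a + k + 1 := by push_cast; ring
      rwa [this] at hP
  have hl : l = a + ((l - a).toNat : Int) := by omega
  rw [hl]
  exact key _

-- B's loop over the lengths, with the dict-keys invariant; the break is harmless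
-- because after a repeat-free length every later block is empty
theorem pv_loop_items (s : List Char) :
    ∀ (L : List Int), (∀ l ∈ L, 0 ≤ l) → L.Pairwise (· < ·) →
      ∀ (d : PySem.Dict (List Char) Int), d.keys.Nodup →
        (∀ k ∈ d.keys, ∀ l ∈ L, k ∉ pvWindowsL s l) →
        (pvRepLoop s L d).items = d.items ++ L.flatMap (pvBlock s) := by
  intro L
  induction L with
  | nil => intro _ _ d _ _; simp [pvRepLoop]
  | cons a t ih =>
    intro h0 hp d hdn hdk
    have hnd : (a :: t).Nodup := hp.imp ne_of_lt
    have hstep := pv_levelStep_items s a d (fun k hk => hdk k hk a (by simp))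
    have hflag := pv_fold_flag
      (fun sub => 1 < ((PySem.List.count (pvWindowsL s a) sub : Nat) : Int))
      (fun sub => ((PySem.List.count (pvWindowsL s a) sub : Nat) : Int))
      (PySem.List.dedup (pvWindowsL s a)) d false
    simp only [pvRepLoop]
    rw [hflag]
    show (if (false || !((PySem.List.dedup (pvWindowsL s a)).filter
        (fun x => decide (1 < ((PySem.List.count (pvWindowsL s a) x : Nat) : Int)))).isEmpty) = true
        then pvRepLoop s t (pvLevelStep s d a) else pvLevelStep s d a).items
        = d.items ++ List.flatMap (pvBlock s) (a :: t)
    have hcand : ((PySem.List.dedup (pvWindowsL s a)).filter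
        (fun x => decide (1 < ((PySem.List.count (pvWindowsL s a) x : Nat) : Int)))) = pvCand s a := by
      rw [PySem.List.dedup_eq_ofList]
      rfl
    rw [Bool.false_or, hcand]
    by_cases hc : (pvCand s a).isEmpty
    · -- break: this and every later block is empty
      rw [hc]
      simp only [Bool.not_true, Bool.false_eq_true, if_false]
      rw [hstep, List.flatMap_cons, ← pv_block_eq_cand]
      have hempty : pvCand s a = [] := List.isEmpty_iff.mp hc
      have hnorep : ¬ pvRep s a := (pv_cand_empty_iff s a).mp hempty
      have htail : t.flatMap (pvBlock s) = [] := by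
        rw [List.flatMap_eq_nil_iff]
        intro l' hl'
        rw [pv_block_eq_cand, List.map_eq_nil_iff, pv_cand_empty_iff]
        exact pv_not_rep_of_le s a l' (h0 a (by simp)) (le_of_lt ((List.pairwise_cons.mp hp).1 l' hl'))
          hnorep
      rw [htail, List.append_nil]
    · -- continue with the remaining lengths
      have hce : (pvCand s a).isEmpty = false := Bool.eq_false_iff.mpr hc
      rw [hce]
      simp only [Bool.not_false, if_pos]
      have hkeys : ∀ k ∈ (pvLevelStep s d a).keys, k ∈ d.keys ∨ k ∈ pvWindowsL s a := by
        intro k hk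
        have : k ∈ (pvLevelStep s d a).items.map (·.1) := hk
        rw [hstep, List.map_append, List.mem_append] at this
        rcases this with h | h
        · exact Or.inl h
        · right
          rw [List.map_map] at h
          obtain ⟨x, hx, rfl⟩ := List.mem_map.mp h
          exact (PySem.Set.mem_ofList _ _).mp (List.mem_of_mem_filter hx)
      have hknd : (pvLevelStep s d a).keys.Nodup := by
        unfold pvLevelStep
        rw [pv_foldl_if_insert (fun sub => 1 < ((List.count sub (pvWindowsL s a) : Nat) : Int))
          (fun sub => ((List.count sub (pvWindowsL s a) : Nat) : Int))]
        exact PySem.Dict.nodup_keys_foldl_insert _ _ d hdn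
      rw [ih (fun l hl => h0 l (by simp [hl])) (List.pairwise_cons.mp hp).2
        (pvLevelStep s d a) hknd ?_, hstep, ← pv_block_eq_cand, List.flatMap_cons,
        List.append_assoc]
      intro k hk l hl hmem
      rcases hkeys k hk with h | h
      · exact hdk k h l (by simp [hl]) hmem
      · exact pv_window_ne s a l (h0 a (by simp)) (h0 l (by simp [hl]))
          (fun he => (List.nodup_cons.mp hnd).1 (he ▸ hl)) k h hmem

-- the per-region equality
theorem pv_repB_items (s : List Char) : (pvRepB s).items = pvHetero s := by
  unfold pvRepB
  rw [pv_hetero_blocks]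
  have h0 : ∀ l ∈ PySem.List.pyRange 2 ((s.length : Int) + 1) 1, (0 : Int) ≤ l := by
    intro l hl
    rw [PySem.List.mem_pyRange_one] at hl
    omega
  have := pv_loop_items s (PySem.List.pyRange 2 ((s.length : Int) + 1) 1) h0
    (PySem.List.pairwise_lt_pyRange_one 2 ((s.length : Int) + 1)) PySem.Dict.empty
    (by simp [PySem.Dict.keys_empty]) (by simp [PySem.Dict.keys_empty])
  simpa using this

-- ===== assembling the two ports =====

-- step 1 of A
def pvStep1 (frags : List (List Char)) : PySem.Dict (List Char) Int :=
  frags.foldl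
    (fun d frag => (pvHetero frag).foldl (fun d kv => d.modify kv.1 0 (· + kv.2)) d)
    PySem.Dict.empty

-- the common normal form both ports are reduced to
def pvFinal (frags : List (List Char)) (ov : Int) : PySem.Dict (List Char) Int :=
  (pvPairs frags ov).foldl pvChkStep (pvStep1 frags)

def pvDictA (frags : List (List Char)) (ov : Int) : PySem.Dict (List Char) Int :=
  (pvFindNew frags (pvCheck frags (pvStep1 frags) ov) ov).items.foldl
    (fun d kv => d.modify kv.1 0 (· + kv.2)) (pvCheck frags (pvStep1 frags) ov)

theorem pv_A_eq (seq : String) (ov : Int) :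
    process_protein_sequence seq ov
      = (pvDictA (pvFragments seq.toList) ov).items.map (fun kv => (String.ofList kv.1, kv.2)) := rfl

theorem pvDictA_eq (frags : List (List Char)) (ov : Int) :
    pvDictA frags ov = pvFinal frags ov := by
  unfold pvDictA pvFinal
  rw [pvCheck_eq, pvFindNew_eq, pv_noop]
  rw [show (PySem.Dict.empty : PySem.Dict (List Char) Int).items = [] from rfl, List.foldl_nil]

def pvDictB (frags : List (List Char)) (ov : Int) : PySem.Dict (List Char) Int :=
  (frags.zip (PySem.List.slice frags (some 1) none)).foldl
    (fun d p =>
      let left := if ov ≤ (p.1.length : Int)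
                  then PySem.List.slice p.1 (some (-ov)) none else p.1
      let right := if ov ≤ (p.2.length : Int)
                   then PySem.List.slice p.2 none (some ov) else p.2
      (pvRepB (left ++ right)).items.foldl
        (fun d kv =>
          if kv.1.any (fun ch => PySem.Chars.isIn [ch] left) &&
             kv.1.any (fun ch => PySem.Chars.isIn [ch] right) then
            d.modify kv.1 0 (· + kv.2)
          else d)
        d)
    (frags.foldl
      (fun d frag => (pvRepB frag).items.foldl (fun d kv => d.modify kv.1 0 (· + kv.2)) d)
      PySem.Dict.empty)

theorem pv_B_eq (seq : String) (ov : Int) :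
    process_protein_sequence_alt seq ov
      = (pvDictB (pvFragments seq.toList) ov).items.map (fun kv => (String.ofList kv.1, kv.2)) := rfl

theorem pvDictB_eq (frags : List (List Char)) (ov : Int) :
    pvDictB frags ov = pvFinal frags ov := by
  unfold pvDictB pvFinal pvStep1 pvPairs
  rw [PySem.List.slice_from_one]
  simp only [pv_repB_items]
  rw [List.foldl_map]
  rfl

-- ===== VERDICT (by name: the statement is the Claim_ definition above) =====
theorem process_protein_sequence_spec : Claim_equal_process_protein_sequence := by
  intro sequence overlap _
  unfold Spec_process_protein_sequence
  rw [pv_A_eq, pv_B_eq, pvDictA_eq, pvDictB_eq]
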